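-- pv_equiv track=rewrite | github.com/liqiu-debug/AutoDroid | backend/api/scenarios.py | _count_case_statuses
-- ===== SOURCE A (Python) =====
-- from typing import Any, Dict, List, Optional, Tuple
--
-- def _count_case_statuses(cases_results: List[Dict[str, Any]]) -> Dict[str, int]:
--     counts = {
--         "success_count": 0,
--         "warning_count": 0,
--         "skipped_count": 0,
--         "fail_count": 0,
--     }
--
--     for case_entry in cases_results or []:
--         status = case_entry.get("status")
--         if status == "success":
--             counts["success_count"] += 1
--         elif status == "warning":
--             counts["warning_count"] += 1
--         elif status == "skipped":
--             counts["skipped_count"] += 1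
--         else:
--             counts["fail_count"] += 1
--
--     return counts
-- ===== SOURCE B (Python) =====
-- from typing import Any, Dict, List
--
-- def _count_case_statuses(cases_results: List[Dict[str, Any]]) -> Dict[str, int]:
--     statuses = [e.get("status") for e in (cases_results or [])]
--     success = statuses.count("success")
--     warning = statuses.count("warning")
--     skipped = statuses.count("skipped")
--     return {
--         "success_count": success,
--         "warning_count": warning,
--         "skipped_count": skipped,
--         "fail_count": len(statuses) - success - warning - skipped,
--     }
-- ===== Notes on version B (the rewrite author's own statement) =====
-- stated objective: simpler
-- what changed: Replaces the per-element four-way if/elif/else tally with a one-pass status list, three list.count calls, and fail_count derived by subtraction from the total, eliminating the catch-all else branch.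
import Mathlib
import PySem

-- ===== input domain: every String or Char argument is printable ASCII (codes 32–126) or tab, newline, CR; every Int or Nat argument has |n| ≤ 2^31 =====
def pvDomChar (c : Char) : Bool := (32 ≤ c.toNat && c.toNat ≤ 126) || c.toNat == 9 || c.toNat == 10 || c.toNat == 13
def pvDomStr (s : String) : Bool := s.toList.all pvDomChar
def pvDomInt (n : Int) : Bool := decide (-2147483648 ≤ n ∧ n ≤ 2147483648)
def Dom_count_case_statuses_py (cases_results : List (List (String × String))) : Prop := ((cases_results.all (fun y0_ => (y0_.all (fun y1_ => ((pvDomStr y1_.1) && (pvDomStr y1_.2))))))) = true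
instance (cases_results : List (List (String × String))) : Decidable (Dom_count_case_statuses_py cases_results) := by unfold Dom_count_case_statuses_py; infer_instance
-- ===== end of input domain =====

-- B replaces A's per-element four-way if/elif/else with a status list, three counts,
-- and fail_count derived by subtraction from the total (objective: simpler).


-- ===== PORT A =====
-- case_entry.get("status") (dict lookup, None when absent)
def pvGetStatus (e : List (String × String)) : Option String :=
  (PySem.Dict.mk e).get? "status"

-- the body of A's for-loop
def pvStepA (counts : PySem.Dict String Int) (e : List (String × String)) : PySem.Dict String Int :=
  let status := pvGetStatus e
  if status = some "success" then counts.modify "success_count" 0 (· + 1)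
  else if status = some "warning" then counts.modify "warning_count" 0 (· + 1)
  else if status = some "skipped" then counts.modify "skipped_count" 0 (· + 1)
  else counts.modify "fail_count" 0 (· + 1)

def count_case_statuses_py (cases_results : List (List (String × String))) : List (String × Int) :=
  let counts : PySem.Dict String Int :=
    PySem.Dict.mk [("success_count", 0), ("warning_count", 0), ("skipped_count", 0), ("fail_count", 0)]
  let counts := cases_results.foldl pvStepA counts
  counts.items

-- ===== PORT B =====
def count_case_statuses_py_alt (cases_results : List (List (String × String))) : List (String × Int) :=
  let statuses := cases_results.map pvGetStatus
  let success : Int := PySem.List.count statuses (some "success")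
  let warning : Int := PySem.List.count statuses (some "warning")
  let skipped : Int := PySem.List.count statuses (some "skipped")
  [("success_count", success), ("warning_count", warning), ("skipped_count", skipped),
   ("fail_count", (statuses.length : Int) - success - warning - skipped)]

-- ===== PRECONDITION & SPEC =====
def Spec_count_case_statuses_py (cases_results : List (List (String × String))) (out : List (String × Int)) : Prop := out = count_case_statuses_py_alt cases_results
instance (cases_results : List (List (String × String))) (out : List (String × Int)) : Decidable (Spec_count_case_statuses_py cases_results out) := by unfold Spec_count_case_statuses_py; infer_instance

-- ===== CLAIM (what is proved, stated in full; the proofs are below) =====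
def Claim_equal_count_case_statuses_py : Prop := ∀ (cases_results : List (List (String × String))), Dom_count_case_statuses_py cases_results → Spec_count_case_statuses_py cases_results (count_case_statuses_py cases_results)

-- ===== LEMMAS AND PROOFS =====

-- loop invariant of A: the four counters track the status counts seen so far
lemma pvLoopA (cs : List (List (String × String))) (s w k f : Int) :
    cs.foldl pvStepA (PySem.Dict.mk [("success_count", s), ("warning_count", w), ("skipped_count", k), ("fail_count", f)])
      = PySem.Dict.mk
          [("success_count", s + ((cs.map pvGetStatus).count (some "success") : Int)),
           ("warning_count", w + ((cs.map pvGetStatus).count (some "warning") : Int)),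
           ("skipped_count", k + ((cs.map pvGetStatus).count (some "skipped") : Int)),
           ("fail_count", f + (((cs.map pvGetStatus).length : Int)
              - ((cs.map pvGetStatus).count (some "success") : Int)
              - ((cs.map pvGetStatus).count (some "warning") : Int)
              - ((cs.map pvGetStatus).count (some "skipped") : Int)))] := by
  induction cs generalizing s w k f with
  | nil => simp
  | cons e cs ih =>
    simp only [List.foldl_cons, List.map_cons]
    by_cases h1 : pvGetStatus e = some "success"
    · rw [show pvStepA (PySem.Dict.mk [("success_count", s), ("warning_count", w), ("skipped_count", k), ("fail_count", f)]) e
            = PySem.Dict.mk [("success_count", s + 1), ("warning_count", w), ("skipped_count", k), ("fail_count", f)] by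
        simp [pvStepA, h1, PySem.Dict.modify, PySem.Dict.insert, PySem.Dict.getD, PySem.Dict.get?, PySem.Dict.contains]]
      rw [ih]
      simp [h1]
      omega
    · by_cases h2 : pvGetStatus e = some "warning"
      · rw [show pvStepA (PySem.Dict.mk [("success_count", s), ("warning_count", w), ("skipped_count", k), ("fail_count", f)]) e
              = PySem.Dict.mk [("success_count", s), ("warning_count", w + 1), ("skipped_count", k), ("fail_count", f)] by
          simp [pvStepA, h2, PySem.Dict.modify, PySem.Dict.insert, PySem.Dict.getD, PySem.Dict.get?, PySem.Dict.contains]]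
        rw [ih]
        simp [h2]
        omega
      · by_cases h3 : pvGetStatus e = some "skipped"
        · rw [show pvStepA (PySem.Dict.mk [("success_count", s), ("warning_count", w), ("skipped_count", k), ("fail_count", f)]) e
                = PySem.Dict.mk [("success_count", s), ("warning_count", w), ("skipped_count", k + 1), ("fail_count", f)] by
            simp [pvStepA, h3, PySem.Dict.modify, PySem.Dict.insert, PySem.Dict.getD, PySem.Dict.get?, PySem.Dict.contains]]
          rw [ih]
          simp [h3]
          omega
        · rw [show pvStepA (PySem.Dict.mk [("success_count", s), ("warning_count", w), ("skipped_count", k), ("fail_count", f)]) e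
                = PySem.Dict.mk [("success_count", s), ("warning_count", w), ("skipped_count", k), ("fail_count", f + 1)] by
            simp [pvStepA, h1, h2, h3, PySem.Dict.modify, PySem.Dict.insert, PySem.Dict.getD, PySem.Dict.get?, PySem.Dict.contains]]
          rw [ih]
          simp [h1, h2, h3]
          omega

-- ===== VERDICT (by name: the statement is the Claim_ definition above) =====
theorem count_case_statuses_py_spec : Claim_equal_count_case_statuses_py := by
  intro cs _
  unfold Spec_count_case_statuses_py count_case_statuses_py count_case_statuses_py_alt
  simp only [pvLoopA, PySem.List.count_eq]
  simp
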